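-- pv_equiv track=rewrite | github.com/jxcross/eng-dict-2025 | eng_dict_v1_no_audio.py | unmask_word
-- ===== SOURCE A (Python) =====
-- def unmask_word(masked_sentence, original_sentence, input_text):
--     if not input_text:
--         return masked_sentence
--
--     original_words = original_sentence.split()
--     masked_words = masked_sentence.split()
--     input_words = input_text.strip().split()
--
--     # 입력된 각 단어에 대해 마스킹 해제
--     for input_word in input_words:
--         for i, (word, masked) in enumerate(zip(original_words, masked_words)):
--             # 이미 마스킹이 해제된 단어는 건너뛰기
--             if masked == word:
--                 continue
--
--             word_cleaned = ''.join(char.lower() for char in word if char.isalpha())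
--             input_cleaned = ''.join(char.lower() for char in input_word if char.isalpha())
--             if word_cleaned == input_cleaned:
--                 masked_words[i] = word
--
--     return " ".join(masked_words)
-- ===== SOURCE B (Python) =====
-- def unmask_word(masked_sentence, original_sentence, input_text):
--     if not input_text:
--         return masked_sentence
--
--     original_words = original_sentence.split()
--     masked_words = masked_sentence.split()
--
--     def clean(w):
--         return ''.join(c.lower() for c in w if c.isalpha())
--
--     wanted = {clean(w) for w in input_text.strip().split()}
--     result = [word if clean(word) in wanted else masked
--               for word, masked in zip(original_words, masked_words)]
--     return " ".join(result + masked_words[len(result):])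
-- ===== Notes on version B (the rewrite author's own statement) =====
-- stated objective: simpler
-- what changed: The nested inputs-by-positions rescanning loop that mutates masked_words is replaced by building the set of cleaned input words once and a single comprehension over zip(original_words, masked_words), appending the untouched tail.
import Mathlib
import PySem

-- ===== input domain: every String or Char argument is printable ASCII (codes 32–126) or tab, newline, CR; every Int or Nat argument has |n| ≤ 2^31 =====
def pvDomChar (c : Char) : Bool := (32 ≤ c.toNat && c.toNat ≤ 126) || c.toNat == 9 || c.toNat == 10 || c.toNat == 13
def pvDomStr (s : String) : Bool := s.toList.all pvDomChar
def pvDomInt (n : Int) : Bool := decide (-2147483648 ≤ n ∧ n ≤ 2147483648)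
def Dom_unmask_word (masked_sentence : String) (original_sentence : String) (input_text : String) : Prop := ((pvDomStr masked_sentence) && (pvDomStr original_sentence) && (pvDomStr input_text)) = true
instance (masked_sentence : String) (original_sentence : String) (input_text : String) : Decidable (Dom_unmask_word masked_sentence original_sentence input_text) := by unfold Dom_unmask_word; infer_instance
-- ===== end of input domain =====

-- B replaces A's nested inputs×positions mutation loop by one cleaned-input set plus a single
-- pass over zip(original_words, masked_words); objective: simpler (same observable behaviour).

-- ===== PORT A =====
-- ''.join(char.lower() for char in word if char.isalpha())  (kept as List Char; both sides
-- compare these cleaned words for equality, which matches Python string equality)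
def pvClean (w : String) : List Char :=
  (w.toList.filter PySem.Chars.isalpha).map PySem.Chars.lowerChar

-- the inner 'for i, (word, masked) in enumerate(zip(original_words, masked_words))' loop;
-- Python's lazy zip reads masked_words[i] just before the only assignment at i, so reading the
-- pre-loop snapshot is exact
def pvInnerA (ow : List String) (iw : String) (mw : List String) : List String :=
  (PySem.List.enumerate (ow.zip mw)).foldl
    (fun acc p =>
      if p.2.2 == p.2.1 then acc
      else if pvClean p.2.1 == pvClean iw then PySem.List.pySetD acc p.1 p.2.1 else acc)
    mw

def unmask_word (masked_sentence : String) (original_sentence : String) (input_text : String) : String :=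
  if input_text = "" then masked_sentence
  else
    let original_words := PySem.Str.split₀ original_sentence
    let masked_words := PySem.Str.split₀ masked_sentence
    let input_words := PySem.Str.split₀ (PySem.Str.strip input_text)
    PySem.Str.join " " (input_words.foldl (fun mw iw => pvInnerA original_words iw mw) masked_words)

-- ===== PORT B =====
def unmask_word_alt (masked_sentence : String) (original_sentence : String) (input_text : String) : String :=
  if input_text = "" then masked_sentence
  else
    let original_words := PySem.Str.split₀ original_sentence
    let masked_words := PySem.Str.split₀ masked_sentence
    let wanted : PySem.Set (List Char) :=
      PySem.Set.ofList ((PySem.Str.split₀ (PySem.Str.strip input_text)).map pvClean)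
    let result := (original_words.zip masked_words).map
      (fun p => if wanted.contains (pvClean p.1) then p.1 else p.2)
    PySem.Str.join " "
      (result ++ PySem.List.slice masked_words (some (PySem.List.len result)) none)

-- ===== PRECONDITION & SPEC =====
def Spec_unmask_word (masked_sentence : String) (original_sentence : String) (input_text : String) (out : String) : Prop := out = unmask_word_alt masked_sentence original_sentence input_text
instance (masked_sentence : String) (original_sentence : String) (input_text : String) (out : String) : Decidable (Spec_unmask_word masked_sentence original_sentence input_text out) := by unfold Spec_unmask_word; infer_instance

-- ===== CLAIM (what is proved, stated in full; the proofs are below) =====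
def Claim_equal_unmask_word : Prop := ∀ (masked_sentence : String) (original_sentence : String) (input_text : String), Dom_unmask_word masked_sentence original_sentence input_text → Spec_unmask_word masked_sentence original_sentence input_text (unmask_word masked_sentence original_sentence input_text)

-- ===== LEMMAS AND PROOFS =====

-- structural characterisation of one inner pass, generalized over an untouched prefix
theorem pvInnerA_general (c : List Char) (ow mw pre : List String) :
    (PySem.List.enumerate (ow.zip mw) ((pre.length : Nat) : Int)).foldl
      (fun acc p =>
        if p.2.2 == p.2.1 then acc
        else if pvClean p.2.1 == c then PySem.List.pySetD acc p.1 p.2.1 else acc)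
      (pre ++ mw)
    = pre ++ ((ow.zip mw).map (fun p => if pvClean p.1 == c then p.1 else p.2))
          ++ mw.drop (ow.zip mw).length := by
  induction ow generalizing mw pre with
  | nil => simp [PySem.List.enumerate_nil]
  | cons w o ih =>
    cases mw with
    | nil => simp [PySem.List.enumerate_nil]
    | cons msk m =>
      rw [List.zip_cons_cons, PySem.List.enumerate_cons, List.foldl_cons]
      by_cases hskip : msk = w
      · subst hskip
        rw [if_pos (by simp),
          show pre ++ msk :: m = (pre ++ [msk]) ++ m by simp,
          show ((pre.length : Nat) : Int) + 1 = (((pre ++ [msk]).length : Nat) : Int) by simp,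
          ih]
        simp
      · rw [if_neg (by simpa using hskip)]
        by_cases hc : pvClean w = c
        · rw [if_pos (by simpa using hc),
            show PySem.List.pySetD (pre ++ msk :: m) ((pre.length : Nat) : Int) w
                = (pre ++ [w]) ++ m by simp [PySem.List.pySetD_natCast],
            show ((pre.length : Nat) : Int) + 1 = (((pre ++ [w]).length : Nat) : Int) by simp,
            ih]
          simp [hc]
        · rw [if_neg (by simpa using hc),
            show pre ++ msk :: m = (pre ++ [msk]) ++ m by simp,
            show ((pre.length : Nat) : Int) + 1 = (((pre ++ [msk]).length : Nat) : Int) by simp,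
            ih]
          simp [hc]

theorem pvInnerA_eq (ow : List String) (iw : String) (mw : List String) :
    pvInnerA ow iw mw
    = ((ow.zip mw).map (fun p => if pvClean p.1 == pvClean iw then p.1 else p.2))
        ++ mw.drop (ow.zip mw).length := by
  have h := pvInnerA_general (pvClean iw) ow mw []
  simpa [pvInnerA] using h

-- fusing one inner pass into the accumulated membership test
theorem pvFuse (c : List Char) (cs : List (List Char)) (ow mw : List String) :
    ((ow.zip (((ow.zip mw).map (fun p => if pvClean p.1 == c then p.1 else p.2))
          ++ mw.drop (ow.zip mw).length)).map
        (fun p => if cs.contains (pvClean p.1) then p.1 else p.2))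
      ++ (((ow.zip mw).map (fun p => if pvClean p.1 == c then p.1 else p.2))
          ++ mw.drop (ow.zip mw).length).drop
            (ow.zip (((ow.zip mw).map (fun p => if pvClean p.1 == c then p.1 else p.2))
              ++ mw.drop (ow.zip mw).length)).length
    = ((ow.zip mw).map (fun p => if (c :: cs).contains (pvClean p.1) then p.1 else p.2))
        ++ mw.drop (ow.zip mw).length := by
  induction ow generalizing mw with
  | nil => simp
  | cons w o ih =>
    cases mw with
    | nil => simp
    | cons msk m =>
      simp only [List.zip_cons_cons, List.map_cons, List.length_cons, List.drop_succ_cons,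
        List.cons_append]
      rw [List.cons.injEq]
      constructor
      · by_cases hc : pvClean w = c
        · simp [hc]
        · simp [hc]
      · exact ih m

theorem pvMapSnd (ow mw : List String) :
    ((ow.zip mw).map (fun p => p.2)) ++ mw.drop (ow.zip mw).length = mw := by
  induction ow generalizing mw with
  | nil => simp
  | cons w o ih =>
    cases mw with
    | nil => simp
    | cons msk m =>
      simp only [List.map_cons, List.zip_cons_cons, List.length_cons, List.drop_succ_cons,
        List.cons_append, List.cons.injEq]
      exact ⟨trivial, ih m⟩

set_option maxHeartbeats 1000000 in
theorem pvOuter_eq (ow : List String) (iws mw : List String) :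
    iws.foldl (fun m iw => pvInnerA ow iw m) mw
    = ((ow.zip mw).map
        (fun p => if (iws.map pvClean).contains (pvClean p.1) then p.1 else p.2))
        ++ mw.drop (ow.zip mw).length := by
  induction iws generalizing mw with
  | nil =>
    simp only [List.map_nil, List.foldl_nil, List.contains_nil, Bool.false_eq_true, if_false]
    exact (pvMapSnd ow mw).symm
  | cons iw rest ih =>
    rw [List.foldl_cons, pvInnerA_eq, ih, List.map_cons]
    exact pvFuse (pvClean iw) (rest.map pvClean) ow mw

-- ===== VERDICT (by name: the statement is the Claim_ definition above) =====
set_option maxHeartbeats 1000000 in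
theorem unmask_word_spec : Claim_equal_unmask_word := by
  unfold Claim_equal_unmask_word
  intro ms os it _
  unfold Spec_unmask_word
  by_cases h : it = ""
  · simp [unmask_word, unmask_word_alt, h]
  · simp only [unmask_word, unmask_word_alt, h, if_false]
    rw [pvOuter_eq, PySem.List.len_eq, PySem.List.slice_from_natCast, List.length_map]
    refine congrArg (PySem.Str.join " ") (congrArg (· ++ _) ?_)
    exact List.map_congr_left fun p _ => by simp [PySem.Set.contains, PySem.Set.mem_ofList]
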